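-- pv_equiv track=rewrite | github.com/markwh/larkdown | inst/pysrc/larkdown.py | parse_larkdown_to_tuples
-- ===== SOURCE A (Python) =====
-- def parse_larkdown_to_tuples(text, open_delim=">", close_delim=">/"):
--     """
--     Returns a list of tuples
--     """
--
--     lines = text.split('\n')
--     tuples = []
--     current_speaker = None
--     current_message = []
--     ignore_block = False
--     message_open = False  # Indicates if we're within an open message block
--
--     for line in lines:
--         trimmed_line = line.strip()
--
--         if trimmed_line.startswith('<!-- ignore -->'):
--             ignore_block = True
--         elif trimmed_line.startswith('<!-- endignore -->'):
--             ignore_block = False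
--         elif ignore_block:
--             continue
--         elif trimmed_line.startswith(close_delim):
--             if current_speaker and current_message:
--                 tuples.append((current_speaker, '\n'.join(current_message)))
--                 current_message = []
--             message_open = False  # Close the current message block
--         elif trimmed_line.startswith(open_delim):
--             if current_speaker and (current_message or message_open):
--                 # Close the previous message if it's open or there's content to save
--                 tuples.append((current_speaker, '\n'.join(current_message)))
--                 current_message = []
--             current_speaker = trimmed_line[len(open_delim):].strip()
--             message_open = True  # Mark the message block as open
--         elif message_open:
--             # Accumulate lines to the current message if a message block is open
--             current_message.append(line)
--
--     # Handle the last message if the document ends without a closing delimiter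
--     if current_speaker and current_message:
--         tuples.append((current_speaker, '\n'.join(current_message)))
--
--     return tuples
-- ===== SOURCE B (Python) =====
-- def parse_larkdown_to_tuples(text, open_delim=">", close_delim=">/"):
--     """
--     Returns a list of tuples
--     """
--     # Pass 1: drop ignore blocks together with their marker lines.
--     kept = []
--     ignoring = False
--     for line in text.split('\n'):
--         t = line.strip()
--         if t.startswith('<!-- ignore -->'):
--             ignoring = True
--         elif t.startswith('<!-- endignore -->'):
--             ignoring = False
--         elif not ignoring:
--             kept.append(line)
--
--     # Pass 2: classify every kept line into a token (close checked before open).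
--     def tokenize(line):
--         t = line.strip()
--         if t.startswith(close_delim):
--             return ('close', '')
--         if t.startswith(open_delim):
--             return ('open', t[len(open_delim):].strip())
--         return ('text', line)
--
--     tokens = [tokenize(line) for line in kept]
--
--     # Pass 3: run the dialogue automaton over the token stream.
--     tuples = []
--     speaker, msg, is_open = None, [], False
--     for kind, payload in tokens:
--         if kind == 'close':
--             if speaker and msg:
--                 tuples.append((speaker, '\n'.join(msg)))
--                 msg = []
--             is_open = False
--         elif kind == 'open':
--             if speaker and (msg or is_open):
--                 tuples.append((speaker, '\n'.join(msg)))
--                 msg = []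
--             speaker = payload
--             is_open = True
--         elif is_open:
--             msg.append(payload)
--     if speaker and msg:
--         tuples.append((speaker, '\n'.join(msg)))
--     return tuples
-- ===== Notes on version B (the rewrite author's own statement) =====
-- stated objective: alternative
-- what changed: Replaces A's single loop with five pieces of interleaved state by three staged passes: an ignore-block filter, a tokenizer that classifies every kept line into close/open/text tokens, and a dialogue automaton that only dispatches on token kind.
import Mathlib
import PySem

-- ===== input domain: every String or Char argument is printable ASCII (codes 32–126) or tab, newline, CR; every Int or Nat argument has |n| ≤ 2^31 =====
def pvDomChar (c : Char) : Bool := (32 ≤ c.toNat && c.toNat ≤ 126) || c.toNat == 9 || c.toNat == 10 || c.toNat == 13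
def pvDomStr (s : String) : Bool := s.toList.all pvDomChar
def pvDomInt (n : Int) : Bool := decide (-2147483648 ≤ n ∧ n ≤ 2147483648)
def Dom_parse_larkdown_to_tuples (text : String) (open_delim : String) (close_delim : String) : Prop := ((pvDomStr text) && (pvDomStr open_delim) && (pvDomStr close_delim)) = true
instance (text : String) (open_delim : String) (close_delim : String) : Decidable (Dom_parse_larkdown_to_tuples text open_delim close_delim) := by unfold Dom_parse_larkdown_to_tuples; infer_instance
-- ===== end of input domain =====

-- B replaces A's single five-state string-testing loop by three staged passes — an ignore-block
-- filter, a tokenizer mapping each kept line to close/open/text, and a dialogue automaton over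
-- the token stream — same return value (objective: alternative).

-- Python truthiness of the `current_speaker` variable (None or a string)
def pvTruthy (sp : Option String) : Bool :=
  match sp with
  | none => false
  | some s => decide (s ≠ "")

-- ===== PORT A =====
-- one iteration of A's for-loop; state = (tuples, current_speaker, current_message, ignore_block, message_open)
def pvStepA (od cd : String) :
    (List (String × String) × Option String × List String × Bool × Bool) → String →
    (List (String × String) × Option String × List String × Bool × Bool)
  | (tuples, sp, msg, ign, opn), line =>
    let t := PySem.Str.strip line
    if PySem.Str.startswith t "<!-- ignore -->" then (tuples, sp, msg, true, opn)
    else if PySem.Str.startswith t "<!-- endignore -->" then (tuples, sp, msg, false, opn)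
    else if ign then (tuples, sp, msg, ign, opn)
    else if PySem.Str.startswith t cd then
      if pvTruthy sp && !msg.isEmpty then
        (tuples ++ [(sp.getD "", PySem.Str.join "\n" msg)], sp, [], ign, false)
      else (tuples, sp, msg, ign, false)
    else if PySem.Str.startswith t od then
      if pvTruthy sp && (!msg.isEmpty || opn) then
        (tuples ++ [(sp.getD "", PySem.Str.join "\n" msg)],
         some (PySem.Str.strip (PySem.Str.slice t (some (PySem.Str.len od)) none)), [], ign, true)
      else (tuples, some (PySem.Str.strip (PySem.Str.slice t (some (PySem.Str.len od)) none)), msg, ign, true)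
    else if opn then (tuples, sp, msg ++ [line], ign, opn)
    else (tuples, sp, msg, ign, opn)

def parse_larkdown_to_tuples (text : String) (open_delim : String) (close_delim : String) : List (String × String) :=
  let lines := (PySem.Str.split? text "\n").getD []   -- sep "\n" ≠ "", so split? is always `some`
  let st := lines.foldl (pvStepA open_delim close_delim) ([], none, [], false, false)
  if pvTruthy st.2.1 && !st.2.2.1.isEmpty then
    st.1 ++ [(st.2.1.getD "", PySem.Str.join "\n" st.2.2.1)]
  else st.1

-- ===== PORT B =====
-- pass 1: one ignore-filter step; state = (ignoring, kept)
def pvFilterStep (st : Bool × List String) (line : String) : Bool × List String :=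
  let t := PySem.Str.strip line
  if PySem.Str.startswith t "<!-- ignore -->" then (true, st.2)
  else if PySem.Str.startswith t "<!-- endignore -->" then (false, st.2)
  else if !st.1 then (st.1, st.2 ++ [line]) else st

-- pass 2: a token per kept line (Source B's ('close',_) / ('open',name) / ('text',line) tuples)
inductive PvTok : Type
  | close : PvTok
  | opn : String → PvTok
  | text : String → PvTok
deriving DecidableEq, Repr

def pvTokenize (od cd : String) (line : String) : PvTok :=
  let t := PySem.Str.strip line
  if PySem.Str.startswith t cd then .close
  else if PySem.Str.startswith t od then
    .opn (PySem.Str.strip (PySem.Str.slice t (some (PySem.Str.len od)) none))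
  else .text line

-- pass 3: the dialogue automaton; state = (tuples, speaker, msg, is_open)
def pvAutomaton (st : List (String × String) × Option String × List String × Bool) (tok : PvTok) :
    List (String × String) × Option String × List String × Bool :=
  match st, tok with
  | (tuples, sp, msg, _), .close =>
      if pvTruthy sp && !msg.isEmpty then
        (tuples ++ [(sp.getD "", PySem.Str.join "\n" msg)], sp, [], false)
      else (tuples, sp, msg, false)
  | (tuples, sp, msg, opn), .opn name =>
      if pvTruthy sp && (!msg.isEmpty || opn) then
        (tuples ++ [(sp.getD "", PySem.Str.join "\n" msg)], some name, [], true)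
      else (tuples, some name, msg, true)
  | (tuples, sp, msg, opn), .text line =>
      if opn then (tuples, sp, msg ++ [line], opn) else (tuples, sp, msg, opn)

def parse_larkdown_to_tuples_alt (text : String) (open_delim : String) (close_delim : String) : List (String × String) :=
  let kept := (((PySem.Str.split? text "\n").getD []).foldl pvFilterStep (false, [])).2
  let tokens := kept.map (pvTokenize open_delim close_delim)
  let st := tokens.foldl pvAutomaton ([], none, [], false)
  if pvTruthy st.2.1 && !st.2.2.1.isEmpty then
    st.1 ++ [(st.2.1.getD "", PySem.Str.join "\n" st.2.2.1)]
  else st.1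

-- ===== PRECONDITION & SPEC =====
def Spec_parse_larkdown_to_tuples (text : String) (open_delim : String) (close_delim : String) (out : List (String × String)) : Prop := out = parse_larkdown_to_tuples_alt text open_delim close_delim
instance (text : String) (open_delim : String) (close_delim : String) (out : List (String × String)) : Decidable (Spec_parse_larkdown_to_tuples text open_delim close_delim out) := by unfold Spec_parse_larkdown_to_tuples; infer_instance

-- ===== CLAIM (what is proved, stated in full; the proofs are below) =====
def Claim_equal_parse_larkdown_to_tuples : Prop := ∀ (text : String) (open_delim : String) (close_delim : String), Dom_parse_larkdown_to_tuples text open_delim close_delim → Spec_parse_larkdown_to_tuples text open_delim close_delim (parse_larkdown_to_tuples text open_delim close_delim)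

-- ===== LEMMAS AND PROOFS =====

-- reference filter: the lines B's pass 1 keeps, given the current ignore flag
def pvFilt : Bool → List String → List String
  | _, [] => []
  | ign, l :: ls =>
    let t := PySem.Str.strip l
    if PySem.Str.startswith t "<!-- ignore -->" then pvFilt true ls
    else if PySem.Str.startswith t "<!-- endignore -->" then pvFilt false ls
    else if ign then pvFilt ign ls
    else l :: pvFilt ign ls

lemma pvFilterStep_foldl (ls : List String) :
    ∀ (ign : Bool) (acc : List String),
      (ls.foldl pvFilterStep (ign, acc)).2 = acc ++ pvFilt ign ls := by
  induction ls with
  | nil => intro ign acc; simp [pvFilt]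
  | cons l ls ih =>
    intro ign acc
    simp only [List.foldl_cons, pvFilterStep, pvFilt]
    split_ifs with h1 h2 h3 <;> simp_all

lemma pvStep_agree (od cd : String) (ls : List String) :
    ∀ (ign : Bool) (tuples : List (String × String)) (sp : Option String)
      (msg : List String) (opn : Bool),
      (fun (st : List (String × String) × Option String × List String × Bool × Bool) =>
        (st.1, st.2.1, st.2.2.1, st.2.2.2.2))
        (ls.foldl (pvStepA od cd) (tuples, sp, msg, ign, opn)) =
      ((pvFilt ign ls).map (pvTokenize od cd)).foldl pvAutomaton (tuples, sp, msg, opn) := by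
  induction ls with
  | nil => intro ign tuples sp msg opn; simp [pvFilt]
  | cons l ls ih =>
    intro ign tuples sp msg opn
    rw [List.foldl_cons]
    by_cases h1 : PySem.Str.startswith (PySem.Str.strip l) "<!-- ignore -->" = true
    · simp only [pvStepA, pvFilt, h1, if_true]
      exact ih ..
    · by_cases h2 : PySem.Str.startswith (PySem.Str.strip l) "<!-- endignore -->" = true
      · simp only [pvStepA, pvFilt, h1, h2, if_true]
        exact ih ..
      · by_cases h3 : ign = true
        · subst h3
          simp only [pvStepA, pvFilt, h1, h2, if_true]
          exact ih ..
        · have hi : ign = false := by simpa using h3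
          subst hi
          simp only [pvStepA, pvFilt, h1, h2, if_false, Bool.false_eq_true]
          rw [List.map_cons, List.foldl_cons]
          simp only [pvTokenize, pvAutomaton]
          split_ifs <;> simp_all only [if_true, if_false, Bool.false_eq_true]

-- ===== VERDICT (by name: the statement is the Claim_ definition above) =====
theorem parse_larkdown_to_tuples_spec : Claim_equal_parse_larkdown_to_tuples := by
  intro text od cd _
  show parse_larkdown_to_tuples text od cd = parse_larkdown_to_tuples_alt text od cd
  have h := pvStep_agree od cd ((PySem.Str.split? text "\n").getD []) false [] none [] false
  simp only [parse_larkdown_to_tuples, parse_larkdown_to_tuples_alt, pvFilterStep_foldl,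
    List.nil_append, ← h]
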